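-- pv_equiv track=rewrite | github.com/Kunstmord/numericconvert | src/converter.py | find_all_blocks
-- ===== SOURCE A (Python) =====
-- import queue
--
-- def find_block(code: str, substring: str) -> list:
--     res = []
--     index = 0
--     code_len = len(code)
--     while index < code_len:
--         substr_index = code.find(substring, index)
--         if substr_index != -1:
--             start_pos = substr_index
--             if substr_index > 0:
--                 block_indent = 0
--                 curr_pos = substr_index - 1
--                 while code[curr_pos] == ' ' and curr_pos >= 0:
--                     block_indent += 1
--                     curr_pos -= 1
--             else:
--                 block_indent = 0
--             next_newline = code.find('\n', start_pos)
--             if next_newline == -1 or next_newline == code_len - 1: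
--                 res.append([start_pos, len(code), block_indent, -1])  # start position, end position
--                 index = code_len
--             else:
--                 flag = True
--                 while flag:
--                     curr_indent = 0
--                     curr_pos = next_newline + 1
--                     while curr_pos < code_len and code[curr_pos] == ' ':
--                         curr_pos += 1
--                         curr_indent += 1
--                     if curr_indent <= block_indent:
--                         flag = False
--                         res.append([start_pos, next_newline, block_indent, -1])
--                         index = next_newline + 1
--                     else:
--                         next_newline = code.find('\n', curr_pos)
--                         if next_newline == -1 or next_newline == code_len - 1:
--                             res.append([start_pos, len(code), block_indent, -1])  # start position, end position
--                             index = code_len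
--                             flag = False
--         else:
--             break
--     return res
--
-- def find_all_blocks(code: str, substring: str) -> list:
--     unchecked_blocks = queue.Queue()
--     base_blocks = find_block(code, substring)
--     res = []
--     substring_len = len(substring)
--     if base_blocks:
--         for base_block in base_blocks:
--             unchecked_blocks.put(base_block)
--             res.append(base_block)
--         while not unchecked_blocks.empty():
--             tmp_block = unchecked_blocks.get()
--             start_pos = tmp_block[0]
--             tmp_block = code[tmp_block[0] + substring_len + tmp_block[2]:tmp_block[1] + tmp_block[2]]
--             new_blocks = find_block(tmp_block, substring)
--             if new_blocks:
--                 for new_block in new_blocks: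
--                     offset_new_block = new_block.copy()
--                     offset_new_block[0] += start_pos
--                     offset_new_block[1] += start_pos
--                     unchecked_blocks.put(offset_new_block)
--                     res.append(offset_new_block)
--         for block in res:
--             while not code[block[0]:].startswith(substring):
--                 block[0] += 1
--                 block[1] += 1
--         res.sort(key=lambda x: x[0])
--         return res
--     else:
--         return None
-- ===== SOURCE B (Python) =====
-- def find_block(code: str, substring: str) -> list:
--     # unchanged helper from the original module
--     res = []
--     index = 0
--     code_len = len(code)
--     while index < code_len:
--         substr_index = code.find(substring, index)
--         if substr_index != -1:
--             start_pos = substr_index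
--             if substr_index > 0:
--                 block_indent = 0
--                 curr_pos = substr_index - 1
--                 while code[curr_pos] == ' ' and curr_pos >= 0:
--                     block_indent += 1
--                     curr_pos -= 1
--             else:
--                 block_indent = 0
--             next_newline = code.find('\n', start_pos)
--             if next_newline == -1 or next_newline == code_len - 1:
--                 res.append([start_pos, len(code), block_indent, -1])
--                 index = code_len
--             else:
--                 flag = True
--                 while flag:
--                     curr_indent = 0
--                     curr_pos = next_newline + 1
--                     while curr_pos < code_len and code[curr_pos] == ' ':
--                         curr_pos += 1
--                         curr_indent += 1
--                     if curr_indent <= block_indent: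
--                         flag = False
--                         res.append([start_pos, next_newline, block_indent, -1])
--                         index = next_newline + 1
--                     else:
--                         next_newline = code.find('\n', curr_pos)
--                         if next_newline == -1 or next_newline == code_len - 1:
--                             res.append([start_pos, len(code), block_indent, -1])
--                             index = code_len
--                             flag = False
--         else:
--             break
--     return res
--
--
-- def find_all_blocks(code: str, substring: str) -> list:
--     base = find_block(code, substring)
--     if not base:
--         return None
--     sl = len(substring)
--     # depth-first walk with an explicit stack, tagging each block with its
--     # nesting depth instead of expanding breadth-first with a queue
--     tagged = []
--     stack = [(b, 0) for b in reversed(base)]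
--     while stack:
--         b, d = stack.pop()
--         tagged.append((b, d))
--         inner = code[b[0] + sl + b[2]:b[1] + b[2]]
--         for c in reversed(find_block(inner, substring)):
--             stack.append(([c[0] + b[0], c[1] + b[0], c[2], c[3]], d + 1))
--     out = []
--     for b, d in tagged:
--         k = b[0]
--         while not code.startswith(substring, k):
--             k += 1
--         out.append(([k, b[1] + (k - b[0]), b[2], b[3]], d))
--     # blocks with equal starts are emitted outer-first: refine the sort key
--     # with the nesting depth, which recovers exactly that order
--     out.sort(key=lambda t: (t[0][0], t[1]))
--     return [b for b, d in out]
-- ===== Notes on version B (the rewrite author's own statement) =====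
-- stated objective: alternative
-- what changed: Replaces the queue.Queue breadth-first worklist (which mutates shared block lists and fixes offsets in place) by an explicit-stack depth-first traversal that tags every block with its nesting depth, adjusts offsets non-mutatingly, and sorts once by the refined key (start, depth) instead of relying on the stable sort over BFS emission order.
import Mathlib
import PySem

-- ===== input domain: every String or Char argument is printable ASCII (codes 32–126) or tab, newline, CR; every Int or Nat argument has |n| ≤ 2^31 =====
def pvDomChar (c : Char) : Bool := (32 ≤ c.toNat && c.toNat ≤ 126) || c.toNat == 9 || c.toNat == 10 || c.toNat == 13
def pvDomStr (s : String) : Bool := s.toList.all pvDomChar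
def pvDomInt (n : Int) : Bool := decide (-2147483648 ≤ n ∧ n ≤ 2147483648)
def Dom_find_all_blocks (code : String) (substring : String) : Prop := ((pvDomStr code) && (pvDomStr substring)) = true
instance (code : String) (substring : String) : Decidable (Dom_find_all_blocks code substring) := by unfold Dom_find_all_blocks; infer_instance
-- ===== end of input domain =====

-- B replaces A's queue.Queue breadth-first worklist (which mutates shared block lists in place)
-- by an explicit-stack depth-first traversal tagging each block with its nesting depth, a
-- non-mutating offset adjustment, and one sort by the refined key (start, depth);
-- return values agree.

-- ===== PORT A =====
-- Both programs use the same module helper find_block; it is ported once, on List Char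
-- (PySem.Chars/List primitives), with fuel guards that only make the loops total.

-- the indent-scanning loop: while code[curr_pos] == ' ' and curr_pos >= 0: ...
def fbIndent (cs : List Char) (fuel : Nat) (p : Int) : Int :=
  match fuel with
  | 0 => 0
  | f + 1 =>
    if PySem.List.pyGet? cs p = some ' ' ∧ 0 ≤ p then 1 + fbIndent cs f (p - 1) else 0

-- the space-counting loop: while curr_pos < code_len and code[curr_pos] == ' ': ...
def fbCountSp (cs : List Char) (fuel : Nat) (p : Int) : Int :=
  match fuel with
  | 0 => 0
  | f + 1 =>
    if p < (cs.length : Int) ∧ PySem.List.pyGet? cs p = some ' ' then 1 + fbCountSp cs f (p + 1) else 0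

-- the inner `while flag:` loop of find_block; returns (appended block, new index)
def fbInner (cs : List Char) (fuel : Nat) (s bi nn : Int) : List Int × Int :=
  match fuel with
  | 0 => ([s, (cs.length : Int), bi, -1], (cs.length : Int))
  | f + 1 =>
    let cnt := fbCountSp cs (cs.length + 2) (nn + 1)
    if cnt ≤ bi then ([s, nn, bi, -1], nn + 1)
    else
      let nn' := PySem.Chars.findFrom cs ['\n'] (nn + 1 + cnt)
      if nn' = -1 ∨ nn' = (cs.length : Int) - 1 then ([s, (cs.length : Int), bi, -1], (cs.length : Int))
      else fbInner cs f s bi nn'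

-- the outer `while index < code_len:` loop of find_block (str.find(sub, i) = PySem.Chars.findFrom)
def fbOuter (cs sub : List Char) (fuel : Nat) (index : Int) : List (List Int) :=
  match fuel with
  | 0 => []
  | f + 1 =>
    if index < (cs.length : Int) then
      let si := PySem.Chars.findFrom cs sub index
      if si ≠ -1 then
        let bi := if si > 0 then fbIndent cs (cs.length + 2) (si - 1) else 0
        let nn := PySem.Chars.findFrom cs ['\n'] si
        if nn = -1 ∨ nn = (cs.length : Int) - 1 then [[si, (cs.length : Int), bi, -1]]
        else
          let r := fbInner cs (cs.length + 2) si bi nn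
          r.1 :: fbOuter cs sub f r.2
      else []
    else []

def find_block_core (cs sub : List Char) : List (List Int) := fbOuter cs sub (cs.length + 2) 0

-- A: children of one popped block: slice, find_block, offset copies ([0]/[1] += start_pos)
def chA (cs sub : List Char) (b : List Int) : List (List Int) :=
  let sp := b.getD 0 0
  let t := PySem.List.slice cs (some (sp + (sub.length : Int) + b.getD 2 0)) (some (b.getD 1 0 + b.getD 2 0))
  (find_block_core t sub).map (fun c => (c.set 0 (c.getD 0 0 + sp)).set 1 (c.getD 1 0 + sp))

-- A: the `while not unchecked_blocks.empty():` queue loop (queue as FIFO list)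
def bfsA (cs sub : List Char) (fuel : Nat) (q res : List (List Int)) : List (List Int) :=
  match fuel with
  | 0 => res
  | f + 1 =>
    match q with
    | [] => res
    | b :: q' => bfsA cs sub f (q' ++ chA cs sub b) (res ++ chA cs sub b)

-- A: `while not code[block[0]:].startswith(substring): block[0] += 1; block[1] += 1`
def adjA (cs sub : List Char) (fuel : Nat) (b : List Int) : List Int :=
  match fuel with
  | 0 => b
  | f + 1 =>
    if PySem.Chars.startswith (PySem.List.slice cs (some (b.getD 0 0)) none) sub then b
    else adjA cs sub f ((b.set 0 (b.getD 0 0 + 1)).set 1 (b.getD 1 0 + 1))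

def find_all_blocks (code : String) (substring : String) : Option (List (List Int)) :=
  let cs := code.toList
  let sub := substring.toList
  let base := find_block_core cs sub
  if base = [] then none
  else
    let r := bfsA cs sub (cs.length + 2) base base
    some (PySem.List.sorted (r.map (adjA cs sub (cs.length + 2))) (fun x => x.getD 0 0) false)

-- ===== PORT B =====
-- B: children of one block, built as fresh 4-lists (`[c[0]+b[0], c[1]+b[0], c[2], c[3]]`)
def chB (cs sub : List Char) (b : List Int) : List (List Int) :=
  let t := PySem.List.slice cs (some (b.getD 0 0 + (sub.length : Int) + b.getD 2 0)) (some (b.getD 1 0 + b.getD 2 0))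
  (find_block_core t sub).map (fun c => [c.getD 0 0 + b.getD 0 0, c.getD 1 0 + b.getD 0 0, c.getD 2 0, c.getD 3 0])

-- B's `while stack:` depth-first loop.  The stack is modelled with its TOP FIRST, so
-- Python's "push reversed(children), pop from the end" is "prepend the children in order".
def dfsStk (cs sub : List Char) (fuel : Nat) (st res : List (List Int × Nat)) : List (List Int × Nat) :=
  match fuel, st with
  | 0, _ => res
  | _ + 1, [] => res
  | f + 1, (b, d) :: st' =>
    dfsStk cs sub f (((chB cs sub b).map (fun c => (c, d + 1))) ++ st') (res ++ [(b, d)])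

-- B's `k = b[0]; while not code.startswith(substring, k): k += 1`
-- (startswith with a start argument; exact for 0 ≤ k, which holds for every block start here)
def advB (cs sub : List Char) (fuel : Nat) (k : Int) : Int :=
  match fuel with
  | 0 => k
  | f + 1 => if PySem.Chars.startswith (cs.drop k.toNat) sub then k else advB cs sub f (k + 1)

-- B's non-mutating adjustment of one tagged block
def adjP (cs sub : List Char) (fuel : Nat) (t : List Int × Nat) : List Int × Nat :=
  let k := advB cs sub fuel (t.1.getD 0 0)
  ([k, t.1.getD 1 0 + (k - t.1.getD 0 0), t.1.getD 2 0, t.1.getD 3 0], t.2)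

def find_all_blocks_alt (code : String) (substring : String) : Option (List (List Int)) :=
  let cs := code.toList
  let sub := substring.toList
  let base := find_block_core cs sub
  if base = [] then none
  else
    let tagged := dfsStk cs sub (cs.length + 2) (base.map (fun b => (b, 0))) []
    let out := tagged.map (adjP cs sub (cs.length + 2))
    some ((PySem.List.sorted2 out (fun t => t.1.getD 0 0) (fun t => t.2) false).map Prod.fst)

-- ===== PRECONDITION & SPEC =====
-- A never returns on an empty substring with nonempty code (find_block then always yields a
-- block whose inner slice reproduces a block, so the queue loop runs forever); those inputs
-- are excluded. A raises no exceptions elsewhere.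
def Pre_find_all_blocks (code : String) (substring : String) : Prop := substring ≠ "" ∨ code = ""
instance (code : String) (substring : String) : Decidable (Pre_find_all_blocks code substring) := by
  unfold Pre_find_all_blocks; infer_instance

def pvWitness_find_all_blocks : String × String := ("a b\n  c\nd a e\n  a f\n    g\nh", "a")

def Spec_find_all_blocks (code : String) (substring : String) (out : Option (List (List Int))) : Prop := out = find_all_blocks_alt code substring
instance (code : String) (substring : String) (out : Option (List (List Int))) : Decidable (Spec_find_all_blocks code substring out) := by unfold Spec_find_all_blocks; infer_instance

-- ===== CLAIM (what is proved, stated in full; the proofs are below) =====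
def Claim_equal_find_all_blocks : Prop := ∀ (code : String) (substring : String), Dom_find_all_blocks code substring → Pre_find_all_blocks code substring → Spec_find_all_blocks code substring (find_all_blocks code substring)

-- ===== LEMMAS AND PROOFS =====

-- block-list invariant: every worklist element is a 4-list [s, e, i, -1] with 0 ≤ s ≤ e, 0 ≤ i
def InvQ (b : List Int) : Prop := ∃ s e i : Int, b = [s, e, i, -1] ∧ 0 ≤ s ∧ s ≤ e ∧ 0 ≤ i

-- size measures
def Msum (l : List (List Int)) : Int := (l.map (fun b => b.getD 1 0 - b.getD 0 0 + 1)).sum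
def MN (l : List (List Int)) : Nat := (l.map (fun b => (b.getD 1 0 - b.getD 0 0 + 1).toNat)).sum
def mB (b : List Int) : Nat := (b.getD 1 0 - b.getD 0 0 + 1).toNat
def MNp (st : List (List Int × Nat)) : Nat := MN (st.map Prod.fst)

-- proof-only level / depth-first views of the expansion
def iterC (cs sub : List Char) : Nat → List (List Int) → List (List Int)
  | 0, l => l
  | j + 1, l => iterC cs sub j (l.flatMap (chB cs sub))

def levB (cs sub : List Char) (fuel : Nat) (l res : List (List Int)) : List (List Int) :=
  match fuel with
  | 0 => res
  | f + 1 =>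
    match l with
    | [] => res
    | _ => levB cs sub f (l.flatMap (chB cs sub)) (res ++ l)

def levT (cs sub : List Char) : Nat → List (List Int) → Nat → List (List Int × Nat)
  | 0, _, _ => []
  | _ + 1, [], _ => []
  | f + 1, l, d => l.map (fun b => (b, d)) ++ levT cs sub f (l.flatMap (chB cs sub)) (d + 1)

def dfsR (cs sub : List Char) : Nat → List Int → Nat → List (List Int × Nat)
  | 0, _, _ => []
  | f + 1, b, d => (b, d) :: (chB cs sub b).flatMap (fun c => dfsR cs sub f c (d + 1))

def Fdfs (cs sub : List Char) (l : List (List Int)) (d : Nat) : List (List Int × Nat) :=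
  l.flatMap (fun b => dfsR cs sub (mB b) b d)

theorem fbCountSp_facts (cs : List Char) (fuel : Nat) (p : Int) :
    0 ≤ fbCountSp cs fuel p ∧ (p ≤ (cs.length : Int) → p + fbCountSp cs fuel p ≤ (cs.length : Int)) := by
  induction fuel generalizing p with
  | zero => simp [fbCountSp]
  | succ f ih =>
    simp only [fbCountSp]
    split_ifs with h
    · have := ih (p + 1)
      have h2 : p + 1 ≤ (cs.length : Int) := by omega
      have := this.2 h2
      omega
    · constructor
      · omega
      · intro _; omega

theorem fbIndent_nonneg (cs : List Char) (fuel : Nat) (p : Int) : 0 ≤ fbIndent cs fuel p := by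
  induction fuel generalizing p with
  | zero => simp [fbIndent]
  | succ f ih =>
    simp only [fbIndent]
    split_ifs with h
    · have := ih (p - 1); omega
    · omega

theorem findFrom_facts (cs pat : List Char) (hpat : pat ≠ []) (k : Int) (h0 : 0 ≤ k) (hk : k ≤ (cs.length : Int))
    (h : PySem.Chars.findFrom cs pat k ≠ -1) :
    k ≤ PySem.Chars.findFrom cs pat k ∧
      PySem.Chars.findFrom cs pat k + (pat.length : Int) ≤ (cs.length : Int) := by
  obtain ⟨k', rfl⟩ : ∃ k' : Nat, k = (k' : Int) := ⟨k.toNat, by omega⟩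
  have hk' : k' ≤ cs.length := by exact_mod_cast hk
  obtain ⟨h1, h2, -⟩ := PySem.Chars.findFrom_natCast_spec cs pat k' hk' h
  refine ⟨h1, ?_⟩
  have hlen := h2.length_le
  rw [List.length_drop] at hlen
  have hr : (0:Int) ≤ PySem.Chars.findFrom cs pat (k' : Int) := le_trans (by omega) h1
  have hp : 0 < pat.length := List.length_pos_of_ne_nil hpat
  omega

theorem fbInner_facts (cs : List Char) (fuel : Nat) (s bi nn : Int)
    (hs : 0 ≤ s) (hsn : s ≤ nn) (hnn : nn ≤ (cs.length : Int) - 2) :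
    ∃ e : Int, (fbInner cs fuel s bi nn).1 = [s, e, bi, -1] ∧ s ≤ e ∧
      (((fbInner cs fuel s bi nn).2 = e + 1 ∧ e ≤ (cs.length : Int) - 2) ∨
       ((fbInner cs fuel s bi nn).2 = (cs.length : Int) ∧ e = (cs.length : Int))) := by
  induction fuel generalizing nn with
  | zero =>
    exact ⟨(cs.length : Int), rfl, by omega, Or.inr ⟨rfl, rfl⟩⟩
  | succ f ih =>
    simp only [fbInner]
    split_ifs with h1 h2
    · exact ⟨nn, rfl, hsn, Or.inl ⟨rfl, hnn⟩⟩
    · exact ⟨(cs.length : Int), rfl, by omega, Or.inr ⟨rfl, rfl⟩⟩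
    · -- recursive case: nn' is a real newline position with nn < nn' ≤ len - 2
      set cnt := fbCountSp cs (cs.length + 2) (nn + 1) with hcnt
      have hc := fbCountSp_facts cs (cs.length + 2) (nn + 1)
      set p := nn + 1 + cnt with hp
      have hne : PySem.Chars.findFrom cs ['\n'] p ≠ -1 := by
        intro hx; exact h2 (Or.inl hx)
      have hff := findFrom_facts cs ['\n'] (by simp) p (by omega) (by have := hc.2 (by omega); omega) hne
      simp only [List.length_cons, List.length_nil] at hff
      push_neg at h2
      exact ih (PySem.Chars.findFrom cs ['\n'] p) (by omega) (by omega)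

theorem blk_getD0 (s e i x : Int) : (([s, e, i, x] : List Int)).getD 0 0 = s := rfl
theorem blk_getD1 (s e i x : Int) : (([s, e, i, x] : List Int)).getD 1 0 = e := rfl
theorem blk_getD2 (s e i x : Int) : (([s, e, i, x] : List Int)).getD 2 0 = i := rfl
theorem Msum_nil : Msum [] = 0 := rfl
theorem Msum_cons (b : List Int) (l : List (List Int)) :
    Msum (b :: l) = (b.getD 1 0 - b.getD 0 0 + 1) + Msum l := by simp [Msum]

theorem fbOuter_facts (cs sub : List Char) (hsub : sub ≠ []) (fuel : Nat) (index : Int)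
    (h0 : 0 ≤ index) (h1 : index ≤ (cs.length : Int) + 1) :
    (∀ b ∈ fbOuter cs sub fuel index, ∃ s e i : Int, b = [s, e, i, -1] ∧
        index ≤ s ∧ s ≤ e ∧ e ≤ (cs.length : Int) ∧ 0 ≤ i) ∧
      Msum (fbOuter cs sub fuel index) ≤ (cs.length : Int) + 1 - index := by
  induction fuel generalizing index with
  | zero => exact ⟨by simp [fbOuter], by simp [fbOuter, Msum]; omega⟩
  | succ f ih =>
    simp only [fbOuter]
    have hp : 0 < (sub.length : Int) := by
      have := List.length_pos_of_ne_nil hsub; omega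
    by_cases hlt : index < (cs.length : Int)
    · simp only [if_pos hlt]
      set si := PySem.Chars.findFrom cs sub index with hsi
      by_cases hfound : si ≠ -1
      · simp only [if_pos hfound]
        have hff := findFrom_facts cs sub hsub index h0 (by omega) (by rw [← hsi]; exact hfound)
        rw [← hsi] at hff
        set bi := if si > 0 then fbIndent cs (cs.length + 2) (si - 1) else 0 with hbi
        have hbi0 : 0 ≤ bi := by
          rw [hbi]; split_ifs with h
          · exact fbIndent_nonneg cs (cs.length + 2) (si - 1)
          · omega
        set nn := PySem.Chars.findFrom cs ['\n'] si with hnn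
        by_cases hnl : nn = -1 ∨ nn = (cs.length : Int) - 1
        · simp only [if_pos hnl]
          constructor
          · rintro b hb
            simp only [List.mem_singleton] at hb
            exact ⟨si, (cs.length : Int), bi, hb, hff.1, by omega, by omega, hbi0⟩
          · rw [Msum_cons, blk_getD0, blk_getD1, Msum_nil]; omega
        · simp only [if_neg hnl]
          have hnl2 : nn ≠ -1 ∧ nn ≠ (cs.length : Int) - 1 := by
            constructor <;> (intro hx; exact hnl (by simp [hx]))
          have hffn := findFrom_facts cs ['\n'] (by simp) si (by omega) (by omega)
            (by rw [← hnn]; exact hnl2.1)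
          rw [← hnn] at hffn
          simp only [List.length_cons, List.length_nil] at hffn
          have hnn2 : nn ≤ (cs.length : Int) - 2 := by
            rcases hffn with ⟨hx1, hx2⟩
            have := hnl2.2; omega
          obtain ⟨e, he1, he2, he3⟩ := fbInner_facts cs (cs.length + 2) si bi nn (by omega) hffn.1 hnn2
          rcases he3 with ⟨hidx, helt⟩ | ⟨hidx, helt⟩
          · have hrec := ih (e + 1) (by omega) (by omega)
            rw [hidx]
            constructor
            · rintro b hb
              rcases List.mem_cons.mp hb with rfl | hb
              · rw [he1]; exact ⟨si, e, bi, rfl, hff.1, he2, by omega, hbi0⟩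
              · obtain ⟨s', e', i', hb', h1', h2', h3', h4'⟩ := hrec.1 b hb
                exact ⟨s', e', i', hb', by omega, h2', h3', h4'⟩
            · have h2' := hrec.2
              rw [he1, Msum_cons, blk_getD0, blk_getD1]
              omega
          · rw [hidx]
            have hout : fbOuter cs sub f (cs.length : Int) = [] := by
              cases f with
              | zero => simp [fbOuter]
              | succ f' => simp [fbOuter]
            rw [hout]
            constructor
            · rintro b hb
              rcases List.mem_cons.mp hb with rfl | hb
              · rw [he1]; exact ⟨si, e, bi, rfl, hff.1, he2, by omega, hbi0⟩
              · simp at hb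
            · rw [he1, Msum_cons, blk_getD0, blk_getD1, Msum_nil]
              omega
      · simp only [if_neg hfound]
        exact ⟨by simp, by simp [Msum]; omega⟩
    · simp only [if_neg hlt]
      exact ⟨by simp, by simp [Msum]; omega⟩

theorem find_block_core_facts (cs sub : List Char) (hsub : sub ≠ []) :
    (∀ b ∈ find_block_core cs sub, InvQ b) ∧ Msum (find_block_core cs sub) ≤ (cs.length : Int) + 1 := by
  have h := fbOuter_facts cs sub hsub (cs.length + 2) 0 (by omega) (by omega)
  refine ⟨fun b hb => ?_, by have := h.2; simpa [find_block_core] using this⟩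
  obtain ⟨s, e, i, hb', h1, h2, h3, h4⟩ := h.1 b hb
  exact ⟨s, e, i, hb', h1, h2, h4⟩

theorem MN_eq_Msum (l : List (List Int)) (h : ∀ b ∈ l, InvQ b) : (MN l : Int) = Msum l := by
  induction l with
  | nil => simp [MN, Msum]
  | cons b l ih =>
    have hb := h b (by simp)
    obtain ⟨s, e, i, rfl, hs, hse, hi⟩ := hb
    have := ih (fun b hb => h b (by simp [hb]))
    simp [MN, Msum] at this ⊢
    omega

theorem MN_cons (b : List Int) (l : List (List Int)) :
    MN (b :: l) = mB b + MN l := by simp [MN, mB]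
theorem MN_nil : MN [] = 0 := rfl
theorem MN_append (l r : List (List Int)) : MN (l ++ r) = MN l + MN r := by
  simp [MN]

theorem mem_mB_le_MN (b : List Int) (l : List (List Int)) (h : b ∈ l) : mB b ≤ MN l := by
  induction l with
  | nil => simp at h
  | cons c l ih =>
    rw [MN_cons]
    rcases List.mem_cons.mp h with rfl | h
    · omega
    · have := ih h; omega

theorem find_block_core_nil (sub : List Char) : find_block_core [] sub = [] := by
  simp [find_block_core, fbOuter]

theorem bfsA_nil (cs sub : List Char) (f : Nat) (res : List (List Int)) :
    bfsA cs sub f [] res = res := by cases f <;> simp [bfsA]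

theorem levB_nil (cs sub : List Char) (g : Nat) (res : List (List Int)) :
    levB cs sub g [] res = res := by cases g <;> simp [levB]

theorem MN_offset (sp : Int) (l : List (List Int)) (h : ∀ c ∈ l, InvQ c) :
    MN (l.map (fun c => (c.set 0 (c.getD 0 0 + sp)).set 1 (c.getD 1 0 + sp))) = MN l := by
  induction l with
  | nil => rfl
  | cons c l ih =>
    obtain ⟨s, e, i, rfl, -, -, -⟩ := h c (by simp)
    have := ih (fun c hc => h c (by simp [hc]))
    simp only [List.map_cons, MN_cons] at this ⊢
    rw [this]
    simp [List.set_cons_zero, List.set_cons_succ, List.getD_cons_zero, mB]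

theorem chA_eq_chB (cs sub : List Char) (hsub : sub ≠ []) (b : List Int) :
    chA cs sub b = chB cs sub b := by
  unfold chA chB
  apply List.map_congr_left
  intro c hc
  obtain ⟨s, e, i, rfl, -, -, -⟩ := (find_block_core_facts _ sub hsub).1 c hc
  rfl

theorem chA_facts (cs sub : List Char) (hsub : sub ≠ []) (b : List Int) (hb : InvQ b) :
    (∀ c ∈ chA cs sub b, InvQ c) ∧ MN (chA cs sub b) + 1 ≤ mB b := by
  obtain ⟨s, e, i, rfl, hs, hse, hi⟩ := hb
  unfold chA
  simp only [blk_getD0, blk_getD1, blk_getD2, mB]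
  set t := PySem.List.slice cs (some (s + (sub.length : Int) + i)) (some (e + i)) with ht
  obtain ⟨hFinv, hFm⟩ := find_block_core_facts t sub hsub
  have hsubl : 0 < (sub.length : Int) := by
    have := List.length_pos_of_ne_nil hsub; omega
  constructor
  · intro c hc
    obtain ⟨c0, hc0, rfl⟩ := List.mem_map.mp hc
    obtain ⟨s0, e0, i0, rfl, h1, h2, h3⟩ := hFinv c0 hc0
    exact ⟨s0 + s, e0 + s, i0, rfl, by omega, by omega, h3⟩
  · rw [MN_offset s _ hFinv]
    have hMN : (MN (find_block_core t sub) : Int) = Msum (find_block_core t sub) :=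
      MN_eq_Msum _ hFinv
    by_cases htz : t.length = 0
    · have : t = [] := List.eq_nil_of_length_eq_zero htz
      rw [this, find_block_core_nil, MN_nil]
      omega
    · have hsl : t = List.take ((e + i).toNat - (s + (sub.length : Int) + i).toNat)
          (List.drop (s + (sub.length : Int) + i).toNat cs) := by
        rw [ht]
        exact PySem.List.slice_toNat cs (by omega) (by omega)
      have hlen : (t.length : Int) ≤ e - s - (sub.length : Int) := by
        have h1 : t.length ≤ (e + i).toNat - (s + (sub.length : Int) + i).toNat := by
          rw [hsl]; exact List.length_take_le _ _
        omega
      omega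

theorem chB_facts (cs sub : List Char) (hsub : sub ≠ []) (b : List Int) (hb : InvQ b) :
    (∀ c ∈ chB cs sub b, InvQ c) ∧ MN (chB cs sub b) + 1 ≤ mB b := by
  rw [← chA_eq_chB cs sub hsub]
  exact chA_facts cs sub hsub b hb

theorem MN_flatMap_chA (cs sub : List Char) (hsub : sub ≠ []) (q : List (List Int))
    (h : ∀ b ∈ q, InvQ b) : MN (q.flatMap (chA cs sub)) + q.length ≤ MN q := by
  induction q with
  | nil => simp [MN]
  | cons b q ih =>
    have hb := h b (by simp)
    have hch := (chA_facts cs sub hsub b hb).2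
    have := ih (fun c hc => h c (by simp [hc]))
    simp only [List.flatMap_cons, MN_append, MN_cons, List.length_cons]
    omega

theorem MN_flatMap_chB (cs sub : List Char) (hsub : sub ≠ []) (q : List (List Int))
    (h : ∀ b ∈ q, InvQ b) : MN (q.flatMap (chB cs sub)) + q.length ≤ MN q := by
  have hfun : chA cs sub = chB cs sub := funext (chA_eq_chB cs sub hsub)
  rw [← hfun]
  exact MN_flatMap_chA cs sub hsub q h

theorem bfsA_rot (cs sub : List Char) (q r res : List (List Int)) (f : Nat) :
    bfsA cs sub (f + q.length) (q ++ r) res =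
      bfsA cs sub f (r ++ q.flatMap (chA cs sub)) (res ++ q.flatMap (chA cs sub)) := by
  induction q generalizing r res with
  | nil => simp [List.flatMap]
  | cons b q ih =>
    have : f + (b :: q).length = (f + q.length) + 1 := by simp; omega
    rw [this]
    simp only [List.cons_append, bfsA]
    rw [List.append_assoc q r (chA cs sub b), ih (r ++ chA cs sub b) (res ++ chA cs sub b)]
    simp [List.flatMap_cons, List.append_assoc]

theorem bfs_eq_lev (cs sub : List Char) (hsub : sub ≠ []) (k : Nat) :
    ∀ (f g : Nat) (q res : List (List Int)), MN q ≤ k → (∀ b ∈ q, InvQ b) →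
      MN q ≤ f → MN q + 1 ≤ g →
      bfsA cs sub f q (res ++ q) = levB cs sub g q res := by
  induction k using Nat.strong_induction_on with
  | _ k ihk =>
    intro f g q res hk hq hf hg
    cases q with
    | nil => rw [bfsA_nil, levB_nil, List.append_nil]
    | cons b q' =>
      have hfun : chA cs sub = chB cs sub := funext (chA_eq_chB cs sub hsub)
      have h1 : 1 ≤ MN (b :: q') := by
        obtain ⟨s, e, i, hb, hx1, hx2, hx3⟩ := hq b (by simp)
        rw [MN_cons, hb]
        simp only [mB, blk_getD0, blk_getD1]
        omega
      have hflat : MN ((b :: q').flatMap (chB cs sub)) + (b :: q').length ≤ MN (b :: q') := by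
        rw [← hfun]; exact MN_flatMap_chA cs sub hsub _ hq
      have hInvC : ∀ c ∈ (b :: q').flatMap (chB cs sub), InvQ c := by
        rw [← hfun]
        intro c hc
        obtain ⟨b', hb', hc'⟩ := List.mem_flatMap.mp hc
        exact (chA_facts cs sub hsub b' (hq b' hb')).1 c hc'
      have hlen : 1 ≤ (b :: q').length := by simp
      obtain ⟨f1, rfl⟩ : ∃ f1, f = f1 + (b :: q').length := ⟨f - (b :: q').length, by omega⟩
      have hrot := bfsA_rot cs sub (b :: q') [] (res ++ (b :: q')) f1
      simp only [List.append_nil, List.nil_append] at hrot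
      rw [hrot, hfun]
      obtain ⟨g1, rfl⟩ : ∃ g1, g = g1 + 1 := ⟨g - 1, by omega⟩
      have hstep := ihk (MN ((b :: q').flatMap (chB cs sub))) (by omega) f1 g1
        ((b :: q').flatMap (chB cs sub)) (res ++ (b :: q')) le_rfl hInvC (by omega) (by omega)
      rw [hstep]
      rfl

-- ---------- level view (A side) ----------

theorem levB_eq_levT (cs sub : List Char) (f : Nat) :
    ∀ (l res : List (List Int)) (d : Nat),
      levB cs sub f l res = res ++ (levT cs sub f l d).map Prod.fst := by
  induction f with
  | zero => intro l res d; simp [levB, levT]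
  | succ f ih =>
    intro l res d
    cases l with
    | nil => simp [levB, levT]
    | cons b l' =>
      show levB cs sub f _ _ = _
      rw [ih ((b :: l').flatMap (chB cs sub)) (res ++ (b :: l')) (d + 1)]
      simp [levT, List.append_assoc, Function.comp_def]

theorem levT_depth_ge (cs sub : List Char) (f : Nat) :
    ∀ (l : List (List Int)) (d : Nat) (t : List Int × Nat), t ∈ levT cs sub f l d → d ≤ t.2 := by
  induction f with
  | zero => intro l d t ht; simp [levT] at ht
  | succ f ih =>
    intro l d t ht
    cases l with
    | nil => simp [levT] at ht
    | cons b l' =>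
      simp only [levT, List.mem_append] at ht
      rcases ht with ht | ht
      · obtain ⟨c, -, rfl⟩ := List.mem_map.mp ht
        simp
      · have := ih _ _ _ ht; omega

theorem levT_pairwise (cs sub : List Char) (f : Nat) :
    ∀ (l : List (List Int)) (d : Nat),
      (levT cs sub f l d).Pairwise (fun a b => a.2 ≤ b.2) := by
  induction f with
  | zero => intro l d; simp [levT]
  | succ f ih =>
    intro l d
    cases l with
    | nil => simp [levT]
    | cons b l' =>
      show ((b :: l').map (fun b => (b, d)) ++ levT cs sub f _ (d + 1)).Pairwise _
      rw [List.pairwise_append]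
      refine ⟨?_, ih _ _, ?_⟩
      · rw [List.pairwise_map]
        have : ∀ (m : List (List Int)), m.Pairwise (fun (_ _ : List Int) => d ≤ d) := by
          intro m
          induction m with
          | nil => simp
          | cons c m ihm => exact List.pairwise_cons.mpr ⟨fun _ _ => le_rfl, ihm⟩
        exact this (b :: l')
      · intro a ha b hb
        obtain ⟨c, -, rfl⟩ := List.mem_map.mp ha
        have hd := levT_depth_ge cs sub f _ _ _ hb
        show d ≤ b.2
        omega

theorem levT_filter (cs sub : List Char) (hsub : sub ≠ []) (f : Nat) :
    ∀ (l : List (List Int)) (d j : Nat), (∀ b ∈ l, InvQ b) → MN l ≤ f →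
      (levT cs sub f l d).filter (fun t => decide (t.2 = d + j)) =
        (iterC cs sub j l).map (fun b => (b, d + j)) := by
  induction f with
  | zero =>
    intro l d j hl hf
    have : l = [] := by
      cases l with
      | nil => rfl
      | cons b l' =>
        exfalso
        obtain ⟨s, e, i, hb, hx1, hx2, hx3⟩ := hl b (by simp)
        have h1 : 1 ≤ mB b := by rw [hb]; simp only [mB, blk_getD0, blk_getD1]; omega
        rw [MN_cons] at hf; omega
    subst this
    have : ∀ j, iterC cs sub j ([] : List (List Int)) = [] := by
      intro j; induction j with
      | zero => rfl
      | succ j ih => simpa [iterC] using ih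
    simp [levT, this j]
  | succ f ih =>
    intro l d j hl hf
    cases l with
    | nil =>
      have : ∀ j, iterC cs sub j ([] : List (List Int)) = [] := by
        intro j; induction j with
        | zero => rfl
        | succ j ih => simpa [iterC] using ih
      simp [levT, this j]
    | cons b l' =>
      have hInvC : ∀ c ∈ (b :: l').flatMap (chB cs sub), InvQ c := by
        intro c hc
        obtain ⟨b', hb', hc'⟩ := List.mem_flatMap.mp hc
        exact (chB_facts cs sub hsub b' (hl b' hb')).1 c hc'
      have hMN : MN ((b :: l').flatMap (chB cs sub)) ≤ f := by
        have := MN_flatMap_chB cs sub hsub (b :: l') hl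
        simp only [List.length_cons] at this
        omega
      show (((b :: l').map (fun b => (b, d)) ++ levT cs sub f _ (d + 1)).filter _) = _
      rw [List.filter_append]
      cases j with
      | zero =>
        have h1 : ((b :: l').map (fun b => (b, d))).filter (fun t => decide (t.2 = d + 0)) =
            (b :: l').map (fun b => (b, d)) := by
          apply List.filter_eq_self.mpr
          intro t ht
          obtain ⟨c, -, rfl⟩ := List.mem_map.mp ht
          simp
        have h2 : (levT cs sub f ((b :: l').flatMap (chB cs sub)) (d + 1)).filter
            (fun t => decide (t.2 = d + 0)) = [] := by
          apply List.filter_eq_nil_iff.mpr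
          intro t ht
          have := levT_depth_ge cs sub f _ _ _ ht
          simp; omega
        rw [h1, h2, List.append_nil]
        simp [iterC]
      | succ j =>
        have h1 : ((b :: l').map (fun b => (b, d))).filter (fun t => decide (t.2 = d + (j + 1))) = [] := by
          apply List.filter_eq_nil_iff.mpr
          intro t ht
          obtain ⟨c, -, rfl⟩ := List.mem_map.mp ht
          simp only [decide_eq_true_eq]
          omega
        have h2 := ih ((b :: l').flatMap (chB cs sub)) (d + 1) j hInvC hMN
        have harith : ∀ t : List Int × Nat, (decide (t.2 = d + (j + 1))) = (decide (t.2 = (d + 1) + j)) := by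
          intro t
          have : d + (j + 1) = (d + 1) + j := by omega
          rw [this]
        rw [h1, List.nil_append, List.filter_congr (fun t _ => harith t), h2]
        have : (d + 1) + j = d + (j + 1) := by omega
        rw [this]
        rfl

-- ---------- depth-first view (B side) ----------

theorem dfsR_depth_ge (cs sub : List Char) (f : Nat) :
    ∀ (b : List Int) (d : Nat) (t : List Int × Nat), t ∈ dfsR cs sub f b d → d ≤ t.2 := by
  induction f with
  | zero => intro b d t ht; simp [dfsR] at ht
  | succ f ih =>
    intro b d t ht
    simp only [dfsR, List.mem_cons] at ht
    rcases ht with rfl | ht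
    · simp
    · obtain ⟨c, -, hc⟩ := List.mem_flatMap.mp ht
      have := ih c (d + 1) t hc
      omega

theorem dfsR_inv (cs sub : List Char) (hsub : sub ≠ []) (f : Nat) :
    ∀ (b : List Int) (d : Nat), InvQ b → ∀ t ∈ dfsR cs sub f b d, InvQ t.1 := by
  induction f with
  | zero => intro b d _ t ht; simp [dfsR] at ht
  | succ f ih =>
    intro b d hb t ht
    simp only [dfsR, List.mem_cons] at ht
    rcases ht with rfl | ht
    · exact hb
    · obtain ⟨c, hc, hct⟩ := List.mem_flatMap.mp ht
      exact ih c (d + 1) ((chB_facts cs sub hsub b hb).1 c hc) t hct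

theorem mB_pos (b : List Int) (hb : InvQ b) : 1 ≤ mB b := by
  obtain ⟨s, e, i, rfl, hs, hse, hi⟩ := hb
  simp only [mB, blk_getD0, blk_getD1]
  omega

theorem mB_child_lt (cs sub : List Char) (hsub : sub ≠ []) (b c : List Int)
    (hb : InvQ b) (hc : c ∈ chB cs sub b) : mB c < mB b := by
  have h1 := mem_mB_le_MN c (chB cs sub b) hc
  have h2 := (chB_facts cs sub hsub b hb).2
  omega

theorem dfsR_stable (cs sub : List Char) (hsub : sub ≠ []) :
    ∀ (n f g : Nat) (b : List Int) (d : Nat), InvQ b → mB b ≤ n → n ≤ f → n ≤ g →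
      dfsR cs sub f b d = dfsR cs sub g b d := by
  intro n
  induction n using Nat.strong_induction_on with
  | _ n ihn =>
    intro f g b d hb hn hf hg
    have h1 := mB_pos b hb
    obtain ⟨f', rfl⟩ : ∃ f', f = f' + 1 := ⟨f - 1, by omega⟩
    obtain ⟨g', rfl⟩ : ∃ g', g = g' + 1 := ⟨g - 1, by omega⟩
    show (b, d) :: _ = (b, d) :: _
    congr 1
    rw [List.flatMap_def, List.flatMap_def]
    apply congrArg
    apply List.map_congr_left
    intro c hc
    have hc' := (chB_facts cs sub hsub b hb).1 c hc
    have hlt := mB_child_lt cs sub hsub b c hb hc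
    exact ihn (mB c) (by omega) f' g' c (d + 1) hc' le_rfl (by omega) (by omega)

theorem dfsR_unfold (cs sub : List Char) (hsub : sub ≠ []) (b : List Int) (d : Nat)
    (hb : InvQ b) :
    dfsR cs sub (mB b) b d = (b, d) :: Fdfs cs sub (chB cs sub b) (d + 1) := by
  have h1 := mB_pos b hb
  obtain ⟨m, hm⟩ : ∃ m, mB b = m + 1 := ⟨mB b - 1, by omega⟩
  rw [hm]
  show (b, d) :: _ = (b, d) :: _
  congr 1
  unfold Fdfs
  rw [List.flatMap_def, List.flatMap_def]
  apply congrArg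
  apply List.map_congr_left
  intro c hc
  have hc' := (chB_facts cs sub hsub b hb).1 c hc
  have hlt := mB_child_lt cs sub hsub b c hb hc
  exact dfsR_stable cs sub hsub (mB c) m (mB c) c (d + 1) hc' le_rfl (by omega) le_rfl

theorem dfsStk_nil (cs sub : List Char) (f : Nat) (res : List (List Int × Nat)) :
    dfsStk cs sub f [] res = res := by cases f <;> simp [dfsStk]

theorem MNp_cons (t : List Int × Nat) (st : List (List Int × Nat)) :
    MNp (t :: st) = mB t.1 + MNp st := by simp [MNp, MN_cons]

theorem MNp_append (a b : List (List Int × Nat)) : MNp (a ++ b) = MNp a + MNp b := by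
  simp [MNp, MN_append]

theorem MNp_map_tag (l : List (List Int)) (d : Nat) :
    MNp (l.map (fun c => (c, d))) = MN l := by
  simp [MNp, List.map_map, Function.comp_def]

theorem dfsStk_eq (cs sub : List Char) (hsub : sub ≠ []) :
    ∀ (n : Nat) (st res : List (List Int × Nat)) (f : Nat),
      (∀ t ∈ st, InvQ t.1) → MNp st ≤ n → n ≤ f →
      dfsStk cs sub f st res = res ++ st.flatMap (fun t => dfsR cs sub (mB t.1) t.1 t.2) := by
  intro n
  induction n using Nat.strong_induction_on with
  | _ n ihn =>
    intro st res f hst hn hf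
    cases st with
    | nil => rw [dfsStk_nil]; simp
    | cons t st' =>
      obtain ⟨b, d⟩ := t
      have hb : InvQ b := hst (b, d) (by simp)
      have h1 := mB_pos b hb
      have hMNp : MNp ((b, d) :: st') = mB b + MNp st' := MNp_cons _ _
      obtain ⟨f', rfl⟩ : ∃ f', f = f' + 1 := ⟨f - 1, by omega⟩
      show dfsStk cs sub f' _ _ = _
      have hchInv := (chB_facts cs sub hsub b hb).1
      have hchMN := (chB_facts cs sub hsub b hb).2
      have hstNew : ∀ t ∈ ((chB cs sub b).map (fun c => (c, d + 1))) ++ st', InvQ t.1 := by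
        intro t ht
        rcases List.mem_append.mp ht with ht | ht
        · obtain ⟨c, hc, rfl⟩ := List.mem_map.mp ht
          exact hchInv c hc
        · exact hst t (by simp [ht])
      have hMNnew : MNp (((chB cs sub b).map (fun c => (c, d + 1))) ++ st') ≤ n - 1 := by
        rw [MNp_append, MNp_map_tag]
        omega
      rw [ihn (n - 1) (by omega) _ _ f' hstNew hMNnew (by omega)]
      rw [List.flatMap_cons, dfsR_unfold cs sub hsub b d hb]
      have hmapfl : (((chB cs sub b).map (fun c => (c, d + 1)))).flatMap
          (fun t => dfsR cs sub (mB t.1) t.1 t.2)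
          = Fdfs cs sub (chB cs sub b) (d + 1) := by
        rw [List.flatMap_map]
        rfl
      rw [List.flatMap_append, hmapfl]
      simp [List.append_assoc]

theorem Fdfs_inv (cs sub : List Char) (hsub : sub ≠ []) (l : List (List Int)) (d : Nat)
    (hl : ∀ b ∈ l, InvQ b) : ∀ t ∈ Fdfs cs sub l d, InvQ t.1 := by
  intro t ht
  obtain ⟨b, hb, ht'⟩ := List.mem_flatMap.mp ht
  exact dfsR_inv cs sub hsub (mB b) b d (hl b hb) t ht'

theorem Fdfs_depth_ge (cs sub : List Char) (l : List (List Int)) (d : Nat) :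
    ∀ t ∈ Fdfs cs sub l d, d ≤ t.2 := by
  intro t ht
  obtain ⟨b, hb, ht'⟩ := List.mem_flatMap.mp ht
  exact dfsR_depth_ge cs sub (mB b) b d t ht'

theorem pv_filter_flatMap {α β : Type} (l : List α) (f : α → List β) (p : β → Bool) :
    (l.flatMap f).filter p = l.flatMap (fun x => (f x).filter p) := by
  induction l with
  | nil => simp
  | cons x l ih => simp [List.flatMap_cons, List.filter_append, ih]

theorem Fdfs_filter (cs sub : List Char) (hsub : sub ≠ []) :
    ∀ (j : Nat) (l : List (List Int)) (d : Nat), (∀ b ∈ l, InvQ b) →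
      (Fdfs cs sub l d).filter (fun t => decide (t.2 = d + j)) =
        (iterC cs sub j l).map (fun b => (b, d + j)) := by
  intro j
  induction j with
  | zero =>
    intro l d hl
    induction l with
    | nil => simp [Fdfs, iterC]
    | cons b l' ihl =>
      have hb := hl b (by simp)
      have hrest := ihl (fun c hc => hl c (by simp [hc]))
      show ((Fdfs cs sub (b :: l') d).filter _) = _
      unfold Fdfs
      rw [List.flatMap_cons, List.filter_append, dfsR_unfold cs sub hsub b d hb]
      have h2 : (Fdfs cs sub (chB cs sub b) (d + 1)).filter (fun t => decide (t.2 = d + 0)) = [] := by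
        apply List.filter_eq_nil_iff.mpr
        intro t ht
        have := Fdfs_depth_ge cs sub (chB cs sub b) (d + 1) t ht
        simp
        omega
      rw [List.filter_cons]
      simp only [decide_eq_true_eq]
      rw [if_pos (by omega), h2]
      unfold Fdfs at hrest
      rw [hrest]
      simp [iterC]
  | succ j ih =>
    intro l d hl
    have hInvC : ∀ c ∈ l.flatMap (chB cs sub), InvQ c := by
      intro c hc
      obtain ⟨b', hb', hc'⟩ := List.mem_flatMap.mp hc
      exact (chB_facts cs sub hsub b' (hl b' hb')).1 c hc'
    have hstep : (Fdfs cs sub l d).filter (fun t => decide (t.2 = d + (j + 1)))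
        = (Fdfs cs sub (l.flatMap (chB cs sub)) (d + 1)).filter
            (fun t => decide (t.2 = d + (j + 1))) := by
      have hcongr : Fdfs cs sub l d
          = l.flatMap (fun b => (b, d) :: Fdfs cs sub (chB cs sub b) (d + 1)) := by
        unfold Fdfs
        rw [List.flatMap_def, List.flatMap_def]
        apply congrArg
        apply List.map_congr_left
        intro b hb
        exact dfsR_unfold cs sub hsub b d (hl b hb)
      rw [hcongr, pv_filter_flatMap]
      have hFflat : Fdfs cs sub (l.flatMap (chB cs sub)) (d + 1)
          = l.flatMap (fun b => Fdfs cs sub (chB cs sub b) (d + 1)) := by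
        unfold Fdfs
        rw [List.flatMap_assoc]
      rw [hFflat, pv_filter_flatMap]
      have hfun : (fun x => ((x, d) :: Fdfs cs sub (chB cs sub x) (d + 1)).filter
            (fun t => decide (t.2 = d + (j + 1))))
          = (fun x => (Fdfs cs sub (chB cs sub x) (d + 1)).filter
            (fun t => decide (t.2 = d + (j + 1)))) := by
        funext b
        rw [List.filter_cons]
        simp only [decide_eq_true_eq]
        rw [if_neg (by omega)]
      rw [hfun]
    rw [hstep]
    have harith : ∀ t : List Int × Nat, (decide (t.2 = d + (j + 1))) = (decide (t.2 = (d + 1) + j)) := by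
      intro t
      have : d + (j + 1) = (d + 1) + j := by omega
      rw [this]
    rw [List.filter_congr (fun t _ => harith t), ih (l.flatMap (chB cs sub)) (d + 1) hInvC]
    have : (d + 1) + j = d + (j + 1) := by omega
    rw [this]
    rfl

-- ---------- the offset adjustment: A's in-place loop = B's non-mutating loop ----------
theorem blk_getD3 (s e i x : Int) : (([s, e, i, x] : List Int)).getD 3 0 = x := rfl

theorem adjA_eq_advB (cs sub : List Char) (f : Nat) :
    ∀ (s e i : Int), 0 ≤ s →
      adjA cs sub f [s, e, i, -1] = [advB cs sub f s, e + (advB cs sub f s - s), i, -1] := by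
  induction f with
  | zero =>
    intro s e i hs
    show [s, e, i, -1] = [s, e + (s - s), i, -1]
    simp
  | succ f ih =>
    intro s e i hs
    have hsl : PySem.List.slice cs (some s) none = cs.drop s.toNat := by
      rw [PySem.List.slice_from cs hs]
    simp only [adjA, advB, blk_getD0, blk_getD1, hsl]
    split_ifs with h
    · simp
    · have hset : (((([s, e, i, -1] : List Int)).set 0 (s + 1)).set 1 (e + 1)) = [s + 1, e + 1, i, -1] := rfl
      rw [hset, ih (s + 1) (e + 1) i (by omega)]
      have harith : (e + 1) + (advB cs sub f (s + 1) - (s + 1)) = e + (advB cs sub f (s + 1) - s) := by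
        ring
      rw [harith]

theorem adj_eq (cs sub : List Char) (f : Nat) (t : List Int × Nat) (ht : InvQ t.1) :
    adjP cs sub f t = (adjA cs sub f t.1, t.2) := by
  obtain ⟨b, d⟩ := t
  obtain ⟨s, e, i, hb, hs, -, -⟩ := ht
  simp only at hb
  subst hb
  unfold adjP
  simp only [blk_getD0, blk_getD1, blk_getD2, blk_getD3]
  rw [adjA_eq_advB cs sub f s e i hs]

-- ---------- generic stable-sort lemmas ----------

theorem pv_insertBy_all_before {α : Type} (bef : α → α → Bool) (x : α) (l : List α)
    (h : ∀ z ∈ l, bef x z = true) : PySem.List.insertBy bef x l = x :: l := by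
  cases l with
  | nil => rfl
  | cons y t => simp [PySem.List.insertBy, h y (by simp)]

theorem pv_insertBy_pairwise {α κ : Type} [LinearOrder κ] (K : α → κ) (x : α) (l : List α)
    (h : l.Pairwise (fun a b => K a ≤ K b)) :
    (PySem.List.insertBy (fun a b => decide (K a < K b)) x l).Pairwise (fun a b => K a ≤ K b) := by
  induction l with
  | nil => simp [PySem.List.insertBy]
  | cons y t ih =>
    rw [List.pairwise_cons] at h
    by_cases hb : K x < K y
    · have h1 : PySem.List.insertBy (fun a b => decide (K a < K b)) x (y :: t) = x :: y :: t := by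
        simp [PySem.List.insertBy, hb]
      rw [h1, List.pairwise_cons]
      refine ⟨?_, List.pairwise_cons.mpr h⟩
      intro z hz
      rcases List.mem_cons.mp hz with rfl | hz
      · exact le_of_lt hb
      · exact le_trans (le_of_lt hb) (h.1 z hz)
    · have h1 : PySem.List.insertBy (fun a b => decide (K a < K b)) x (y :: t) =
          y :: PySem.List.insertBy (fun a b => decide (K a < K b)) x t := by
        simp [PySem.List.insertBy, hb]
      rw [h1, List.pairwise_cons]
      refine ⟨?_, ih h.2⟩
      intro z hz
      rcases (PySem.List.mem_insertBy _ x z t).mp hz with rfl | hz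
      · exact le_of_not_gt hb
      · exact h.1 z hz

theorem pv_insertBy_filter {α κ : Type} [LinearOrder κ] (K : α → κ) (p : α → Bool) (x : α)
    (l : List α) (h : l.Pairwise (fun a b => K a ≤ K b)) :
    (PySem.List.insertBy (fun a b => decide (K a < K b)) x l).filter p
      = if p x then PySem.List.insertBy (fun a b => decide (K a < K b)) x (l.filter p)
        else l.filter p := by
  induction l with
  | nil =>
    cases hp : p x <;> simp [PySem.List.insertBy, List.filter, hp]
  | cons y t ih =>
    rw [List.pairwise_cons] at h
    by_cases hb : K x < K y
    · have h1 : PySem.List.insertBy (fun a b => decide (K a < K b)) x (y :: t) = x :: y :: t := by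
        simp [PySem.List.insertBy, hb]
      rw [h1]
      cases hp : p x with
      | false => simp [List.filter_cons, hp]
      | true =>
        have hall : ∀ z ∈ (y :: t).filter p, (fun a b => decide (K a < K b)) x z = true := by
          intro z hz
          have hz' := (List.mem_filter.mp hz).1
          rcases List.mem_cons.mp hz' with rfl | hz'
          · simpa using hb
          · simpa using lt_of_lt_of_le hb (h.1 z hz')
        rw [pv_insertBy_all_before _ x _ hall]
        simp [List.filter_cons, hp]
    · have h1 : PySem.List.insertBy (fun a b => decide (K a < K b)) x (y :: t) =
          y :: PySem.List.insertBy (fun a b => decide (K a < K b)) x t := by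
        simp [PySem.List.insertBy, hb]
      rw [h1]
      cases hp : p x with
      | false =>
        cases hpy : p y <;> simp [List.filter_cons, hp, hpy, ih h.2]
      | true =>
        cases hpy : p y with
        | true =>
          simp [List.filter_cons, hpy, hp, ih h.2, PySem.List.insertBy, hb]
        | false =>
          simp [List.filter_cons, hpy, hp, ih h.2]

theorem pv_foldl_ins_filter {α κ : Type} [LinearOrder κ] (K : α → κ) (p : α → Bool) (l : List α) :
    ∀ (acc : List α), acc.Pairwise (fun a b => K a ≤ K b) →
      (l.foldl (fun acc x => PySem.List.insertBy (fun a b => decide (K a < K b)) x acc) acc).filter p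
        = (l.filter p).foldl (fun acc x => PySem.List.insertBy (fun a b => decide (K a < K b)) x acc)
            (acc.filter p) := by
  induction l with
  | nil => intro acc h; simp
  | cons x l ih =>
    intro acc h
    show (l.foldl _ (PySem.List.insertBy _ x acc)).filter p = _
    rw [ih _ (pv_insertBy_pairwise K x acc h), pv_insertBy_filter K p x acc h]
    cases hp : p x <;> simp [List.filter_cons, hp]

theorem pv_sorted_filter {α κ : Type} [LinearOrder κ] (K : α → κ) (p : α → Bool) (l : List α) :
    (PySem.List.sorted l K false).filter p = PySem.List.sorted (l.filter p) K false := by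
  rw [PySem.List.sorted_eq_foldl_insertBy, PySem.List.sorted_eq_foldl_insertBy]
  simpa using pv_foldl_ins_filter K p l [] (by simp)

theorem pv_sorted_const {α κ : Type} [LinearOrder κ] (K : α → κ) (c : κ) (l : List α)
    (h : ∀ x ∈ l, K x = c) : PySem.List.sorted l K false = l := by
  apply PySem.List.sorted_eq_self_of_pairwise
  induction l with
  | nil => simp
  | cons x t ih =>
    rw [List.pairwise_cons]
    refine ⟨?_, ih (fun z hz => h z (by simp [hz]))⟩
    intro z hz
    rw [h x (by simp), h z (by simp [hz])]

theorem pv_sorted_filter_key {α κ : Type} [LinearOrder κ] (K : α → κ) (c : κ) (l : List α) :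
    (PySem.List.sorted l K false).filter (fun x => decide (K x = c))
      = l.filter (fun x => decide (K x = c)) := by
  rw [pv_sorted_filter]
  apply pv_sorted_const K c
  intro x hx
  have := (List.mem_filter.mp hx).2
  simpa using this

theorem pv_filter_comm {α : Type} (p q : α → Bool) (l : List α) :
    (l.filter p).filter q = (l.filter q).filter p := by
  rw [List.filter_filter, List.filter_filter]
  exact List.filter_congr (fun x _ => Bool.and_comm _ _)

theorem pv_uniq {α κ : Type} [LinearOrder κ] :
    ∀ (l₁ l₂ : List α) (K : α → κ), l₁.Pairwise (fun a b => K a ≤ K b) →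
      l₂.Pairwise (fun a b => K a ≤ K b) →
      (∀ c, l₁.filter (fun x => decide (K x = c)) = l₂.filter (fun x => decide (K x = c))) →
      l₁ = l₂ := by
  intro l₁
  induction l₁ with
  | nil =>
    intro l₂ K _ _ hfil
    cases l₂ with
    | nil => rfl
    | cons y t₂ =>
      exfalso
      have := hfil (K y)
      simp [List.filter_cons] at this
  | cons x t₁ ih =>
    intro l₂ K h₁ h₂ hfil
    cases l₂ with
    | nil =>
      exfalso
      have := hfil (K x)
      simp [List.filter_cons] at this
    | cons y t₂ =>
      rw [List.pairwise_cons] at h₁ h₂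
      have hkxy : K x = K y := by
        have hx : ∃ z ∈ y :: t₂, K z = K x := by
          have h := hfil (K x)
          have hmem : x ∈ (y :: t₂).filter (fun z => decide (K z = K x)) := by
            rw [← h]; simp [List.filter_cons]
          have h' := List.mem_filter.mp hmem
          exact ⟨x, h'.1, by simpa using h'.2⟩
        have hy : ∃ z ∈ x :: t₁, K z = K y := by
          have h := hfil (K y)
          have hmem : y ∈ (x :: t₁).filter (fun z => decide (K z = K y)) := by
            rw [h]; simp [List.filter_cons]
          have h' := List.mem_filter.mp hmem
          exact ⟨y, h'.1, by simpa using h'.2⟩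
        obtain ⟨z1, hz1, hkz1⟩ := hx
        obtain ⟨z2, hz2, hkz2⟩ := hy
        have ha : K y ≤ K x := by
          rcases List.mem_cons.mp hz1 with rfl | hz1
          · exact le_of_eq hkz1
          · exact hkz1 ▸ h₂.1 z1 hz1
        have hb : K x ≤ K y := by
          rcases List.mem_cons.mp hz2 with rfl | hz2
          · exact le_of_eq hkz2
          · exact hkz2 ▸ h₁.1 z2 hz2
        exact le_antisymm hb ha
      have hfx := hfil (K x)
      rw [List.filter_cons, List.filter_cons] at hfx
      rw [if_pos (by simp), if_pos (by simp [hkxy])] at hfx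
      have hxy : x = y := List.head_eq_of_cons_eq hfx
      subst hxy
      have htls : t₁.filter (fun z => decide (K z = K x)) = t₂.filter (fun z => decide (K z = K x)) :=
        List.tail_eq_of_cons_eq hfx
      have htails : t₁ = t₂ := by
        apply ih t₂ K h₁.2 h₂.2
        intro c
        by_cases hc : K x = c
        · subst hc
          exact htls
        · have h := hfil c
          rw [List.filter_cons, List.filter_cons, if_neg (by simpa using hc), if_neg (by simpa using hc)] at h
          exact h
      rw [htails]

-- sorted2 with keys (k1, k2) is sorted with the lexicographic key
theorem pv_sorted2_eq {α : Type} (k1 : α → Int) (k2 : α → Nat) (xs : List α) :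
    PySem.List.sorted2 xs k1 k2 false
      = PySem.List.sorted xs (fun x => toLex (k1 x, k2 x)) false := by
  have hbef : (fun (a b : α) => decide (k1 a < k1 b) || (!decide (k1 b < k1 a) && decide (k2 a < k2 b)))
      = (fun (a b : α) => decide (toLex (k1 a, k2 a) < toLex (k1 b, k2 b))) := by
    funext a b
    by_cases h1 : k1 a < k1 b
    · simp [h1, Prod.Lex.lt_iff]
    · by_cases h2 : k1 b < k1 a
      · have hne : ¬ (k1 a = k1 b ∧ k2 a < k2 b) := by
          rintro ⟨he, -⟩; omega
        simp [h1, h2, Prod.Lex.lt_iff, hne]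
      · have heq : k1 a = k1 b := le_antisymm (not_lt.mp h2) (not_lt.mp h1)
        by_cases h3 : k2 a < k2 b <;> simp [h1, h2, h3, Prod.Lex.lt_iff, heq]
  rw [PySem.List.sorted_eq_foldl_insertBy]
  show List.foldl (fun acc x => PySem.List.insertBy
      (fun a b => decide (k1 a < k1 b) || (!decide (k1 b < k1 a) && decide (k2 a < k2 b))) x acc) [] xs = _
  rw [hbef]

-- the master comparison: a depth-monotone list sorted by start equals its
-- depth-filter-equal companion sorted by (start, depth), after dropping the tags
theorem pv_main (LA LB : List (List Int × Nat))
    (hpw : LA.Pairwise (fun a b => a.2 ≤ b.2))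
    (hfd : ∀ d : Nat, LA.filter (fun t => decide (t.2 = d)) = LB.filter (fun t => decide (t.2 = d))) :
    PySem.List.sorted (LA.map Prod.fst) (fun x => x.getD 0 0) false
      = (PySem.List.sorted LB (fun t => toLex (t.1.getD 0 0, t.2)) false).map Prod.fst := by
  apply pv_uniq _ _ (fun x : List Int => x.getD 0 0)
  · exact PySem.List.sorted_pairwise _ _
  · have h := PySem.List.sorted_pairwise LB (fun t => toLex (t.1.getD 0 0, t.2))
    rw [List.pairwise_map]
    refine h.imp ?_
    intro a b hab
    rcases (Prod.Lex.le_iff).mp hab with h' | ⟨h', -⟩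
    · exact le_of_lt h'
    · exact le_of_eq h'
  · intro c
    rw [pv_sorted_filter_key]
    rw [List.filter_map, List.filter_map]
    have hpredA : ((fun x : List Int => decide (x.getD 0 0 = c)) ∘ Prod.fst)
        = (fun t : List Int × Nat => decide (t.1.getD 0 0 = c)) := rfl
    rw [hpredA, pv_sorted_filter]
    set p := fun t : List Int × Nat => decide (t.1.getD 0 0 = c) with hp
    congr 1
    -- goal: LA.filter p = sorted (LB.filter p) Klex
    have hXc : ∀ t ∈ LA.filter p, t.1.getD 0 0 = c := by
      intro t ht
      have := (List.mem_filter.mp ht).2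
      simpa [hp] using this
    have hLc : ∀ t ∈ LB.filter p, t.1.getD 0 0 = c := by
      intro t ht
      have := (List.mem_filter.mp ht).2
      simpa [hp] using this
    apply pv_uniq _ _ (fun t : List Int × Nat => toLex (t.1.getD 0 0, t.2))
    · have h1 : (LA.filter p).Pairwise (fun a b => a.2 ≤ b.2) := hpw.filter p
      refine h1.imp_of_mem ?_
      intro a b ha hb hab
      rw [Prod.Lex.le_iff]
      right
      refine ⟨?_, hab⟩
      show a.1.getD 0 0 = b.1.getD 0 0
      rw [hXc a ha, hXc b hb]
    · exact PySem.List.sorted_pairwise _ _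
    · intro cc
      rw [pv_sorted_filter_key]
      by_cases hc2 : (ofLex cc).1 = c
      · have hccform : cc = toLex (c, (ofLex cc).2) := by
          rw [← hc2]
          rfl
        have hcongrA : ∀ t ∈ LA.filter p,
            (decide (toLex (t.1.getD 0 0, t.2) = cc)) = (decide (t.2 = (ofLex cc).2)) := by
          intro t ht
          rw [hXc t ht, hccform]
          simp [toLex_inj, Prod.ext_iff]
        have hcongrB : ∀ t ∈ LB.filter p,
            (decide (toLex (t.1.getD 0 0, t.2) = cc)) = (decide (t.2 = (ofLex cc).2)) := by
          intro t ht
          rw [hLc t ht, hccform]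
          simp [toLex_inj, Prod.ext_iff]
        rw [List.filter_congr hcongrA, List.filter_congr hcongrB]
        rw [pv_filter_comm p _ LA, pv_filter_comm p _ LB, hfd ((ofLex cc).2)]
      · have hnilA : (LA.filter p).filter (fun t => decide (toLex (t.1.getD 0 0, t.2) = cc)) = [] := by
          apply List.filter_eq_nil_iff.mpr
          intro t ht
          simp only [decide_eq_true_eq]
          intro hEq
          apply hc2
          rw [← hEq]
          exact hXc t ht
        have hnilB : (LB.filter p).filter (fun t => decide (toLex (t.1.getD 0 0, t.2) = cc)) = [] := by
          apply List.filter_eq_nil_iff.mpr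
          intro t ht
          simp only [decide_eq_true_eq]
          intro hEq
          apply hc2
          rw [← hEq]
          exact hLc t ht
        rw [hnilA, hnilB]

-- ===== VERDICT (by name: the statement is the Claim_ definition above) =====
theorem find_all_blocks_spec : Claim_equal_find_all_blocks := by
  intro code substring hdom hpre
  unfold Spec_find_all_blocks find_all_blocks find_all_blocks_alt
  by_cases hb : find_block_core code.toList substring.toList = []
  · simp [hb]
  · simp only [if_neg hb]
    have hsub : substring.toList ≠ [] := by
      rcases hpre with h | h
      · intro hx
        apply h
        have := congrArg String.ofList hx
        simpa using this
      · exfalso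
        apply hb
        have hcs : code.toList = [] := by rw [h]; rfl
        rw [hcs, find_block_core_nil]
    set cs := code.toList with hcs
    set sub := substring.toList with hsubdef
    set base := find_block_core cs sub with hbase
    obtain ⟨hInvB, hMsumB⟩ := find_block_core_facts cs sub hsub
    rw [← hbase] at hInvB hMsumB
    have hMNB : MN base ≤ cs.length + 1 := by
      have h1 : (MN base : Int) = Msum base := MN_eq_Msum base hInvB
      omega
    -- A's queue result, as depth-tagged levels
    have hA : bfsA cs sub (cs.length + 2) base base = (levT cs sub (cs.length + 2) base 0).map Prod.fst := by
      have h1 := bfs_eq_lev cs sub hsub (MN base) (cs.length + 2) (cs.length + 2) base [] le_rfl hInvB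
        (by omega) (by omega)
      simp only [List.nil_append] at h1
      rw [h1, levB_eq_levT cs sub (cs.length + 2) base [] 0, List.nil_append]
    -- B's stack result, as the canonical depth-first flattening
    have hB : dfsStk cs sub (cs.length + 2) (base.map (fun b => (b, 0))) [] = Fdfs cs sub base 0 := by
      have hst : ∀ t ∈ base.map (fun b => (b, (0 : Nat))), InvQ t.1 := by
        intro t ht
        obtain ⟨b', hb', rfl⟩ := List.mem_map.mp ht
        exact hInvB b' hb'
      have hMnp : MNp (base.map (fun b => (b, (0 : Nat)))) = MN base := MNp_map_tag base 0
      rw [dfsStk_eq cs sub hsub (MN base) _ [] (cs.length + 2) hst (by omega) (by omega)]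
      rw [List.nil_append, List.flatMap_map]
      rfl
    rw [hA, hB]
    -- both adjustments coincide on invariant blocks
    have hmapA : ((levT cs sub (cs.length + 2) base 0).map Prod.fst).map (adjA cs sub (cs.length + 2))
        = ((levT cs sub (cs.length + 2) base 0).map
            (fun t => (adjA cs sub (cs.length + 2) t.1, t.2))).map Prod.fst := by
      rw [List.map_map, List.map_map]
      rfl
    have hmapB : (Fdfs cs sub base 0).map (adjP cs sub (cs.length + 2))
        = (Fdfs cs sub base 0).map (fun t => (adjA cs sub (cs.length + 2) t.1, t.2)) := by
      apply List.map_congr_left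
      intro t ht
      exact adj_eq cs sub (cs.length + 2) t (Fdfs_inv cs sub hsub base 0 hInvB t ht)
    rw [hmapA, hmapB, pv_sorted2_eq]
    congr 1
    apply pv_main
    · rw [List.pairwise_map]
      exact (levT_pairwise cs sub (cs.length + 2) base 0).imp (fun h => h)
    · intro d
      rw [List.filter_map, List.filter_map]
      have hpred : ((fun t : List Int × Nat => decide (t.2 = d))
            ∘ (fun t : List Int × Nat => (adjA cs sub (cs.length + 2) t.1, t.2)))
          = (fun t : List Int × Nat => decide (t.2 = d)) := rfl
      rw [hpred]
      have h0 : ∀ t : List Int × Nat, (decide (t.2 = d)) = (decide (t.2 = 0 + d)) := by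
        intro t
        have : d = 0 + d := by omega
        rw [← this]
      rw [List.filter_congr (fun t _ => h0 t), List.filter_congr (fun t _ => h0 t)]
      rw [levT_filter cs sub hsub (cs.length + 2) base 0 d hInvB (by omega)]
      rw [Fdfs_filter cs sub hsub d base 0 hInvB]
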